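-- pv_equiv track=rewrite | github.com/FelixSchuSi/advent-of-code-22 | 09/part-2.py | get_field_dimensions
-- ===== SOURCE A (Python) =====
-- from typing import List, Tuple
--
-- def get_field_dimensions(instructions: List[Tuple[str, int]]) -> Tuple[int, int]:
--     max_x = 0
--     max_y = 0
--     min_x = 0
--     min_y = 0
--     current_x = 0
--     current_y = 0
--     for direction, distance in instructions:
--         if direction == "R":
--             current_x += distance
--         elif direction == "L":
--             current_x -= distance
--         elif direction == "U":
--             current_y += distance
--         elif direction == "D":
--             current_y -= distance
--         max_x = max(max_x, current_x)
--         max_y = max(max_y, current_y)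
--         min_x = min(min_x, current_x)
--         min_y = min(min_y, current_y)
--     height = max_y - min_y + 1
--     width = max_x - min_x + 1
--     start_x = abs(min_x)
--     start_y = abs(min_y)
--     return width, height, start_x, start_y
-- ===== SOURCE B (Python) =====
-- from itertools import accumulate
--
-- _DX = {"R": 1, "L": -1}
-- _DY = {"U": 1, "D": -1}
--
-- def get_field_dimensions(instructions):
--     xs = list(accumulate((_DX.get(d, 0) * n for d, n in instructions), initial=0))
--     ys = list(accumulate((_DY.get(d, 0) * n for d, n in instructions), initial=0))
--     max_x, min_x = max(xs), min(xs)
--     max_y, min_y = max(ys), min(ys)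
--     return max_x - min_x + 1, max_y - min_y + 1, abs(min_x), abs(min_y)
-- ===== Notes on version B (the rewrite author's own statement) =====
-- stated objective: alternative
-- what changed: Replaced the fused min/max-tracking state loop by a prefix-sum decomposition: each instruction is mapped to a signed delta, cumulative x/y position sequences are built with itertools.accumulate (seeded with 0), and width/height/start are reductions (max/min) over those sequences.
import Mathlib
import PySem

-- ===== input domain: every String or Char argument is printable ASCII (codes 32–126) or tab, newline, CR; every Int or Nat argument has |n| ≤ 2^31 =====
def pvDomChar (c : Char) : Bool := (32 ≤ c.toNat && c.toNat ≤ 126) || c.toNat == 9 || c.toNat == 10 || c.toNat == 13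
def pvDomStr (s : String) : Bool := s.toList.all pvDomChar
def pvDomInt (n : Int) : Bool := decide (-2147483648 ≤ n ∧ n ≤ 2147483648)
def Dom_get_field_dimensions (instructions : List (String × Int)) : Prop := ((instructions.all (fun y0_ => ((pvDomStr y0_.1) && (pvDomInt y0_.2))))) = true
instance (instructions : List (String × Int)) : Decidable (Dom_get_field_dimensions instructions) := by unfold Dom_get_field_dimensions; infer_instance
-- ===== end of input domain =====

-- B replaces A's fused running-min/max state loop by prefix-sum sequences followed by max/min reductions (alternative decomposition, same cost).

-- ===== PORT A =====
-- state = (max_x, max_y, min_x, min_y, current_x, current_y), exactly A's loop body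
def pvStepA (st : Int × Int × Int × Int × Int × Int) (p : String × Int) :
    Int × Int × Int × Int × Int × Int :=
  let c :=
    if p.1 = "R" then (st.2.2.2.2.1 + p.2, st.2.2.2.2.2)
    else if p.1 = "L" then (st.2.2.2.2.1 - p.2, st.2.2.2.2.2)
    else if p.1 = "U" then (st.2.2.2.2.1, st.2.2.2.2.2 + p.2)
    else if p.1 = "D" then (st.2.2.2.2.1, st.2.2.2.2.2 - p.2)
    else (st.2.2.2.2.1, st.2.2.2.2.2)
  (max st.1 c.1, max st.2.1 c.2, min st.2.2.1 c.1, min st.2.2.2.1 c.2, c.1, c.2)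

def get_field_dimensions (instructions : List (String × Int)) : Int × Int × Int × Int :=
  let s := instructions.foldl pvStepA (0, 0, 0, 0, 0, 0)
  (s.1 - s.2.2.1 + 1, s.2.1 - s.2.2.2.1 + 1, |s.2.2.1|, |s.2.2.2.1|)

-- ===== PORT B =====
-- Source B's module-level delta dicts
def pvDxDict : PySem.Dict String Int := PySem.Dict.mk [("R", 1), ("L", -1)]
def pvDyDict : PySem.Dict String Int := PySem.Dict.mk [("U", 1), ("D", -1)]

def get_field_dimensions_alt (instructions : List (String × Int)) : Int × Int × Int × Int :=
  -- accumulate(..., initial=0) = List.scanl (·+·) 0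
  let xs := List.scanl (· + ·) 0 (instructions.map (fun p => pvDxDict.getD p.1 0 * p.2))
  let ys := List.scanl (· + ·) 0 (instructions.map (fun p => pvDyDict.getD p.1 0 * p.2))
  let maxX := (PySem.List.max? xs (fun y => y)).getD 0
  let minX := (PySem.List.min? xs (fun y => y)).getD 0
  let maxY := (PySem.List.max? ys (fun y => y)).getD 0
  let minY := (PySem.List.min? ys (fun y => y)).getD 0
  (maxX - minX + 1, maxY - minY + 1, |minX|, |minY|)

-- ===== PRECONDITION & SPEC =====
def Spec_get_field_dimensions (instructions : List (String × Int)) (out : Int × Int × Int × Int) : Prop := out = get_field_dimensions_alt instructions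
instance (instructions : List (String × Int)) (out : Int × Int × Int × Int) : Decidable (Spec_get_field_dimensions instructions out) := by unfold Spec_get_field_dimensions; infer_instance

-- ===== CLAIM (what is proved, stated in full; the proofs are below) =====
def Claim_equal_get_field_dimensions : Prop := ∀ (instructions : List (String × Int)), Dom_get_field_dimensions instructions → Spec_get_field_dimensions instructions (get_field_dimensions instructions)

-- ===== LEMMAS AND PROOFS =====

-- signed x/y deltas of one instruction (proof vocabulary)
def pvFx (p : String × Int) : Int := if p.1 = "R" then p.2 else if p.1 = "L" then -p.2 else 0
def pvFy (p : String × Int) : Int := if p.1 = "U" then p.2 else if p.1 = "D" then -p.2 else 0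

-- positions visited after each move, starting (exclusively) from c
def pvPos (c : Int) : List Int → List Int
  | [] => []
  | d :: t => (c + d) :: pvPos (c + d) t

theorem pvScanl_eq_pos (ds : List Int) : ∀ c : Int, List.scanl (· + ·) c ds = c :: pvPos c ds := by
  induction ds with
  | nil => intro c; rfl
  | cons d t ih => intro c; simp [List.scanl_cons, pvPos, ih]

theorem pvStepA_eq (st : Int × Int × Int × Int × Int × Int) (p : String × Int) :
    pvStepA st p =
      (max st.1 (st.2.2.2.2.1 + pvFx p), max st.2.1 (st.2.2.2.2.2 + pvFy p),
       min st.2.2.1 (st.2.2.2.2.1 + pvFx p), min st.2.2.2.1 (st.2.2.2.2.2 + pvFy p),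
       st.2.2.2.2.1 + pvFx p, st.2.2.2.2.2 + pvFy p) := by
  unfold pvStepA pvFx pvFy
  split_ifs <;> simp_all [sub_eq_add_neg]

theorem pvLoopA (l : List (String × Int)) :
    ∀ mx my nx ny cx cy : Int,
      l.foldl pvStepA (mx, my, nx, ny, cx, cy) =
        ((pvPos cx (l.map pvFx)).foldl max mx,
         (pvPos cy (l.map pvFy)).foldl max my,
         (pvPos cx (l.map pvFx)).foldl min nx,
         (pvPos cy (l.map pvFy)).foldl min ny,
         cx + (l.map pvFx).sum, cy + (l.map pvFy).sum) := by
  induction l with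
  | nil => intro mx my nx ny cx cy; simp [pvPos]
  | cons p t ih =>
    intro mx my nx ny cx cy
    simp only [List.foldl_cons, pvStepA_eq, List.map_cons, pvPos, List.sum_cons, ih]
    simp [add_assoc]

theorem pvDx_eq (p : String × Int) : pvDxDict.getD p.1 0 * p.2 = pvFx p := by
  simp only [pvDxDict, pvFx, PySem.Dict.getD, PySem.Dict.get?_mk_cons]
  split_ifs <;> simp_all [PySem.Dict.get?]

theorem pvDy_eq (p : String × Int) : pvDyDict.getD p.1 0 * p.2 = pvFy p := by
  simp only [pvDyDict, pvFy, PySem.Dict.getD, PySem.Dict.get?_mk_cons]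
  split_ifs <;> simp_all [PySem.Dict.get?]

-- ===== VERDICT (by name: the statement is the Claim_ definition above) =====
theorem get_field_dimensions_spec : Claim_equal_get_field_dimensions := by
  intro ins _
  show get_field_dimensions ins = get_field_dimensions_alt ins
  unfold get_field_dimensions get_field_dimensions_alt
  have hx : (ins.map (fun p => pvDxDict.getD p.1 0 * p.2)) = ins.map pvFx :=
    List.map_congr_left (fun p _ => pvDx_eq p)
  have hy : (ins.map (fun p => pvDyDict.getD p.1 0 * p.2)) = ins.map pvFy :=
    List.map_congr_left (fun p _ => pvDy_eq p)
  simp only [hx, hy, pvScanl_eq_pos, PySem.List.max?_id_cons, PySem.List.min?_id_cons,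
    Option.getD_some, pvLoopA]
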